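-- pv_equiv track=rewrite | github.com/LBacchiani/k8s_smart_deployer | code_generation/yaml_code_generation.py | enumerate_service_groups
-- ===== SOURCE A (Python) =====
-- def enumerate_service_groups(input_list):
--     service_groups = {}
--     result = []
--
--     for host, service in input_list:
--         if service not in service_groups:
--             service_groups[service] = 0
--         result.append((host, service_groups[service], service))
--         service_groups[service] += 1
--
--     return result
-- ===== SOURCE B (Python) =====
-- def enumerate_service_groups(input_list):
--     return [
--         (host, sum(1 for _h, s in input_list[:i] if s == service), service)
--         for i, (host, service) in enumerate(input_list)
--     ]
-- ===== Notes on version B (the rewrite author's own statement) =====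
-- stated objective: alternative
-- what changed: Replaces the running per-service counter dict with a stateless comprehension that computes each index as the count of earlier pairs with the same service in the prefix.
import Mathlib
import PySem

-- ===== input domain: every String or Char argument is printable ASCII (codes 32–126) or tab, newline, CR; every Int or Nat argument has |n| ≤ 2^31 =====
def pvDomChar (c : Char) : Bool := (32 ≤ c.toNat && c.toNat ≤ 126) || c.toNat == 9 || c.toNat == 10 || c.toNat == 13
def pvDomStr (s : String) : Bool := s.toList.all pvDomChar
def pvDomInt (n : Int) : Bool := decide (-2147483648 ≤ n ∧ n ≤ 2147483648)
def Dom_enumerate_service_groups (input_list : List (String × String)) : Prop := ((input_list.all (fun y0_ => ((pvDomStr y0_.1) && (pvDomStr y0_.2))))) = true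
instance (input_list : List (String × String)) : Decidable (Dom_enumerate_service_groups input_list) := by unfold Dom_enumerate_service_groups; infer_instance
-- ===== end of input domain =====

-- B replaces A's running per-service counter dict with a stateless prefix count: same value, no speed claim (B is O(n^2)).

-- ===== PORT A =====
-- A: fold over input, state = (service_groups dict, result list); result.append ported as ++ [·].
def enumerate_service_groups (input_list : List (String × String)) : List (String × Int × String) :=
  (input_list.foldl
    (fun (st : PySem.Dict String Int × List (String × Int × String)) hs =>
      let sg := if st.1.contains hs.2 then st.1 else st.1.insert hs.2 0
      let idx := sg.getD hs.2 0
      (sg.insert hs.2 (idx + 1), st.2 ++ [(hs.1, idx, hs.2)]))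
    ((PySem.Dict.empty : PySem.Dict String Int), ([] : List (String × Int × String)))).2

-- ===== PORT B =====
-- B: list comprehension over enumerate; the 0/1-sum over the slice input_list[:i] is a countP
-- (PySem.List.sum_map_ite_one_zero); the enumerate index i is ≥ 0, so take i.toNat is input_list[:i].
def enumerate_service_groups_alt (input_list : List (String × String)) : List (String × Int × String) :=
  (PySem.List.enumerate input_list).map (fun p =>
    (p.2.1, ((input_list.take p.1.toNat).countP (fun q => q.2 == p.2.2) : Int), p.2.2))

-- ===== PRECONDITION & SPEC =====
def Spec_enumerate_service_groups (input_list : List (String × String)) (out : List (String × Int × String)) : Prop := out = enumerate_service_groups_alt input_list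
instance (input_list : List (String × String)) (out : List (String × Int × String)) : Decidable (Spec_enumerate_service_groups input_list out) := by unfold Spec_enumerate_service_groups; infer_instance

-- ===== CLAIM (what is proved, stated in full; the proofs are below) =====
def Claim_equal_enumerate_service_groups : Prop := ∀ (input_list : List (String × String)), Dom_enumerate_service_groups input_list → Spec_enumerate_service_groups input_list (enumerate_service_groups input_list)

-- ===== LEMMAS AND PROOFS =====

-- Reference function: index of each element = count of same-service pairs in the already-seen prefix.
def pvGo (prev : List (String × String)) : List (String × String) → List (String × Int × String)
  | [] => []
  | (h, s) :: rest =>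
      (h, (prev.countP (fun q => q.2 == s) : Int), s) :: pvGo (prev ++ [(h, s)]) rest

-- A's loop, given the counting invariant on the dict, produces acc ++ pvGo prev xs.
lemma pvLoopA (xs : List (String × String)) :
    ∀ (d : PySem.Dict String Int) (acc : List (String × Int × String))
      (prev : List (String × String)),
      (∀ s, d.getD s 0 = (prev.countP (fun q => q.2 == s) : Int)) →
      (xs.foldl
        (fun (st : PySem.Dict String Int × List (String × Int × String)) hs =>
          let sg := if st.1.contains hs.2 then st.1 else st.1.insert hs.2 0
          let idx := sg.getD hs.2 0
          (sg.insert hs.2 (idx + 1), st.2 ++ [(hs.1, idx, hs.2)]))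
        (d, acc)).2 = acc ++ pvGo prev xs := by
  induction xs with
  | nil => intro d acc prev _; simp [pvGo]
  | cons hd tl ih =>
      intro d acc prev hinv
      obtain ⟨h, s⟩ := hd
      simp only [List.foldl_cons]
      have hsg : (if d.contains s then d else d.insert s 0).getD s 0 = d.getD s 0 := by
        split
        · rfl
        · next hc =>
          rw [PySem.Dict.getD_insert_self, PySem.Dict.getD_of_not_contains]
          simpa using hc
      have hinv' : ∀ t,
          (((if d.contains s then d else d.insert s 0)).insert s
            ((if d.contains s then d else d.insert s 0).getD s 0 + 1)).getD t 0
            = ((prev ++ [(h, s)]).countP (fun q => q.2 == t) : Int) := by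
        intro t
        by_cases hts : t = s
        · subst hts
          rw [PySem.Dict.getD_insert_self, hsg, hinv]
          simp [List.countP_append]
        · rw [PySem.Dict.getD_insert_of_ne (hne := hts)]
          have : (if d.contains s then d else d.insert s 0).getD t 0 = d.getD t 0 := by
            split
            · rfl
            · exact PySem.Dict.getD_insert_of_ne _ _ _ hts
          rw [this, hinv]
          have : ((s == t) : Bool) = false := by simp [Ne.symm hts]
          simp [List.countP_append, this]
      have := ih _ (acc ++ [(h, (if d.contains s then d else d.insert s 0).getD s 0, s)])
        (prev ++ [(h, s)]) hinv'
      simpa [pvGo, hsg, hinv s, List.append_assoc] using this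

-- B's map over enumerate with start k = prev.length over the suffix rest of full = prev ++ rest
-- computes pvGo prev rest.
lemma pvLoopB (rest : List (String × String)) :
    ∀ (prev : List (String × String)),
      ((PySem.List.enumerate rest (prev.length : Int)).map (fun p =>
        (p.2.1, (((prev ++ rest).take p.1.toNat).countP (fun q => q.2 == p.2.2) : Int), p.2.2)))
        = pvGo prev rest := by
  induction rest with
  | nil => intro prev; simp [PySem.List.enumerate_nil, pvGo]
  | cons hd tl ih =>
      intro prev
      obtain ⟨h, s⟩ := hd
      rw [PySem.List.enumerate_cons]
      simp only [List.map_cons, pvGo]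
      have htake : ((prev ++ (h, s) :: tl).take ((prev.length : Int)).toNat) = prev := by
        simp [List.take_left']
      have hfull : prev ++ (h, s) :: tl = (prev ++ [(h, s)]) ++ tl := by simp
      have hlen : ((prev.length : Int) + 1) = ((prev ++ [(h, s)]).length : Int) := by
        simp
      rw [htake, hfull, hlen, ih (prev ++ [(h, s)])]

-- ===== VERDICT (by name: the statement is the Claim_ definition above) =====
theorem enumerate_service_groups_spec : Claim_equal_enumerate_service_groups := by
  intro input_list _
  unfold Spec_enumerate_service_groups enumerate_service_groups enumerate_service_groups_alt
  rw [pvLoopA input_list PySem.Dict.empty [] [] (by intro s; simp)]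
  have := pvLoopB input_list ([] : List (String × String))
  simpa using this.symm
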